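-- pv_equiv track=rewrite | github.com/N0teveryth1ng/DSAlgorithms | stack_queues/monotonic_stack_queues.py | next_small_elem
-- ===== SOURCE A (Python) =====
-- def next_small_elem(s):
--
--     stack = []
--     n = len(s)
--     res = [-1] * n
--
--     for i in range(2 * n-1, -1, -1):
--         idx = i % n
--
--         while stack and stack[-1] >= s[idx]:
--             stack.pop()
--
--         if stack:
--             if i < n:
--                 res[idx] = stack[-1]
--
--         stack.append(s[idx])
--
--     return res
-- ===== SOURCE B (Python) =====
-- def next_small_elem(s):
--     n = len(s)
--     res = []
--     for i in range(n):
--         val = -1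
--         for off in range(1, n):
--             cand = s[(i + off) % n]
--             if cand < s[i]:
--                 val = cand
--                 break
--         res.append(val)
--     return res
-- ===== Notes on version B (the rewrite author's own statement) =====
-- stated objective: simpler
-- what changed: Replaced the monotonic stack over a doubled backward traversal with a direct brute-force circular scan: for each index, look at offsets 1..n-1 and take the first strictly smaller element.
import Mathlib
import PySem

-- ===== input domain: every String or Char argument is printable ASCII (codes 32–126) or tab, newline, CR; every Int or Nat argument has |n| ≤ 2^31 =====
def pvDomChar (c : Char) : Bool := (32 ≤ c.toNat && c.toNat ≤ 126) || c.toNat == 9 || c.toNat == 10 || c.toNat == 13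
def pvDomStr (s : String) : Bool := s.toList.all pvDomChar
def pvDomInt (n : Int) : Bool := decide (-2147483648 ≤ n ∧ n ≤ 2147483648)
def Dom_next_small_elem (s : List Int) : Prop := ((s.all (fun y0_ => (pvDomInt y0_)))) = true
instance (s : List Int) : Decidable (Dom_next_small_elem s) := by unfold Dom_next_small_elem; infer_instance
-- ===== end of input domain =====

-- B replaces A's monotonic stack over a doubled backward traversal by a direct brute-force
-- circular scan (for each i, first strictly smaller element at offsets 1..n-1); objective: simpler.

-- ===== PORT A =====
-- the Python stack is represented head-first: stack[-1] (top) is the head of the list;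
-- 'while stack and stack[-1] >= x: stack.pop()' is the recursion dropGe
def dropGe (x : Int) : List Int → List Int
  | [] => []
  | a :: rest => if x ≤ a then dropGe x rest else a :: rest

def stepA (s : List Int) (n i : Nat) (st : List Int × List Int) : List Int × List Int :=
  let idx := i % n
  let x := s.getD idx 0  -- s[idx]; idx = i % n < n = len(s) inside the loop, so getD is exact
  let stack' := dropGe x st.1
  let res' := match stack' with
    | [] => st.2
    | top :: _ => if i < n then st.2.set idx top else st.2
  (x :: stack', res')

-- 'for i in range(2*n-1, -1, -1)' as the obvious count-down recursion: processes i, i-1, ..., 0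
def loopA (s : List Int) (n : Nat) : Nat → List Int × List Int → List Int × List Int
  | 0, st => st
  | i + 1, st => loopA s n i (stepA s n i st)

def next_small_elem (s : List Int) : List Int :=
  let n := s.length
  (loopA s n (2 * n) ([], List.replicate n (-1))).2

-- ===== PORT B =====
-- inner 'for off in range(1, n): … break' of Source B as first-match recursion over the offset list
def scanB (s : List Int) (n i : Nat) (x : Int) : List Nat → Int
  | [] => -1
  | off :: rest =>
    let cand := s.getD ((i + off) % n) 0  -- s[(i+off) % n], always in range for n > 0
    if cand < x then cand else scanB s n i x rest

def next_small_elem_alt (s : List Int) : List Int :=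
  let n := s.length
  (List.range n).map (fun i => scanB s n i (s.getD i 0) (List.range' 1 (n - 1)))

-- ===== PRECONDITION & SPEC =====
def Spec_next_small_elem (s : List Int) (out : List Int) : Prop := out = next_small_elem_alt s
instance (s : List Int) (out : List Int) : Decidable (Spec_next_small_elem s out) := by unfold Spec_next_small_elem; infer_instance

-- ===== CLAIM (what is proved, stated in full; the proofs are below) =====
def Claim_equal_next_small_elem : Prop := ∀ (s : List Int), Dom_next_small_elem s → Spec_next_small_elem s (next_small_elem s)

-- ===== LEMMAS AND PROOFS =====

-- t j = s[j % n], the doubled circular view of s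
def tval (s : List Int) (j : Nat) : Int := s.getD (j % s.length) 0

-- pOk s i j : s[j] is strictly smaller than s[i]
def pOk (s : List Int) (i : Nat) (j : Nat) : Bool := decide (tval s j < tval s i)

-- surv s i j : t j is strictly smaller than every t k, i ≤ k < j (it survives on the stack)
def surv (s : List Int) (i j : Nat) : Bool := (List.range' i (j - i)).all (fun k => decide (tval s j < tval s k))

-- the indices whose values form the stack after processing indices [i, 2n), top (head) first
def Jset (s : List Int) (i : Nat) : List Nat := (List.range' i (2 * s.length - i)).filter (surv s i)

def ansB (s : List Int) (i : Nat) : Int := scanB s s.length i (s.getD i 0) (List.range' 1 (s.length - 1))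

-- the res list after processing indices [i, 2n)
def resSpec (s : List Int) (i : Nat) : List Int := (List.range s.length).map (fun k => if i ≤ k then ansB s k else -1)

theorem mem_Jset (s : List Int) (i j : Nat) (h : j ∈ Jset s i) :
    surv s i j = true ∧ i ≤ j ∧ j < 2 * s.length := by
  unfold Jset at h
  rcases List.mem_filter.mp h with ⟨hr, hs⟩
  rcases List.mem_range'_1.mp hr with ⟨h1, h2⟩
  exact ⟨hs, h1, by omega⟩

theorem Jset_pairwise (s : List Int) (i : Nat) :
    List.Pairwise (fun a b => tval s b < tval s a) (Jset s i) := by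
  have hlt : List.Pairwise (· < ·) (Jset s i) :=
    (List.pairwise_lt_range' 1).filter _
  refine hlt.imp_of_mem ?_
  intro a b ha hb hab
  rcases mem_Jset s i a ha with ⟨_, hia, _⟩
  rcases mem_Jset s i b hb with ⟨hsb, _, _⟩
  have : a ∈ List.range' i (b - i) := List.mem_range'_1.mpr ⟨hia, by omega⟩
  have := (List.all_eq_true.mp hsb) a this
  simpa using this

theorem dropGe_eq_filter (x : Int) (l : List Int)
    (h : List.Pairwise (fun a b => b < a) l) :
    dropGe x l = l.filter (fun a => decide (a < x)) := by
  induction l with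
  | nil => rfl
  | cons a rest ih =>
    have hrest : ∀ b ∈ rest, b < a := fun b hb => List.rel_of_pairwise_cons h hb
    by_cases hx : x ≤ a
    · have : (decide (a < x)) = false := by simp; omega
      simp [dropGe, hx, this, ih h.of_cons]
    · have hax : a < x := by omega
      have : (decide (a < x)) = true := by simpa using hax
      simp only [dropGe, if_neg hx, List.filter_cons, this, if_pos]
      have : rest.filter (fun a => decide (a < x)) = rest :=
        List.filter_eq_self.mpr (fun b hb => by simpa using lt_trans (hrest b hb) hax)
      simp [this]

theorem surv_cons (s : List Int) (i j : Nat) (h : i < j) :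
    surv s i j = (pOk s i j && surv s (i + 1) j) := by
  unfold surv pOk
  have h1 : j - i = (j - (i + 1)) + 1 := by omega
  rw [h1, List.range'_succ, List.all_cons]

theorem Jset_step (s : List Int) (i : Nat) (h : i < 2 * s.length) :
    Jset s i = i :: (Jset s (i + 1)).filter (pOk s i) := by
  unfold Jset
  have h1 : 2 * s.length - i = (2 * s.length - (i + 1)) + 1 := by omega
  rw [h1, List.range'_succ, List.filter_cons]
  have hsi : surv s i i = true := by unfold surv; simp
  rw [if_pos hsi]
  congr 1
  rw [List.filter_filter]
  refine List.filter_congr ?_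
  intro j hj
  rcases List.mem_range'_1.mp hj with ⟨hij, _⟩
  rw [surv_cons s i j (by omega), Bool.and_comm]

-- head of the survivors strictly below t i = first index in (i, 2n) strictly below t i
theorem Jset_find (s : List Int) (i : Nat) :
    ((Jset s (i + 1)).filter (pOk s i)).head? =
      (List.range' (i + 1) (2 * s.length - (i + 1))).find? (pOk s i) := by
  set l := List.range' (i + 1) (2 * s.length - (i + 1)) with hl
  have hcomm : (l.filter (surv s (i + 1))).filter (pOk s i)
      = (l.filter (pOk s i)).filter (surv s (i + 1)) := by
    rw [List.filter_filter, List.filter_filter]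
    exact List.filter_congr (fun j _ => Bool.and_comm _ _)
  unfold Jset
  rw [← hl, hcomm, List.head?_filter]
  cases hfp : l.find? (pOk s i) with
  | none =>
    have : l.filter (pOk s i) = [] :=
      List.filter_eq_nil_iff.mpr (List.find?_eq_none.mp hfp)
    rw [this]; rfl
  | some j0 =>
    rcases List.find?_eq_some_iff_append.mp hfp with ⟨hpj0, as, bs, hsplit, hpre⟩
    have hsorted : List.Pairwise (· < ·) l := List.pairwise_lt_range' 1
    have hfilter : l.filter (pOk s i) = j0 :: bs.filter (pOk s i) := by
      rw [hsplit, List.filter_append]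
      have : as.filter (pOk s i) = [] :=
        List.filter_eq_nil_iff.mpr (fun a ha => by simpa using hpre a ha)
      rw [this, List.filter_cons, if_pos hpj0]; rfl
    rw [hfilter, List.find?_cons]
    have hq : surv s (i + 1) j0 = true := by
      unfold surv
      refine List.all_eq_true.mpr ?_
      intro k hk
      rcases List.mem_range'_1.mp hk with ⟨hk1, hk2⟩
      have hkj0 : k < j0 := by omega
      have hj0l : j0 ∈ l := by rw [hsplit]; exact List.mem_append.mpr (Or.inr (List.mem_cons_self))
      rcases List.mem_range'_1.mp (hl ▸ hj0l) with ⟨_, hj0ub⟩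
      have hkl : k ∈ l := by rw [hl]; exact List.mem_range'_1.mpr ⟨hk1, by omega⟩
      have hkas : k ∈ as := by
        rw [hsplit] at hkl
        rcases List.mem_append.mp hkl with h' | h'
        · exact h'
        · rcases List.mem_cons.mp h' with h'' | h''
          · omega
          · exfalso
            have hpw := (List.pairwise_append.mp (hsplit ▸ hsorted)).2.1
            have := List.rel_of_pairwise_cons hpw h''
            omega
      have hnk := hpre k hkas
      have h1 : ¬ (tval s k < tval s i) := by simpa [pOk] using hnk
      have h2 : tval s j0 < tval s i := by simpa [pOk] using hpj0
      simp; omega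
    rw [hq]

theorem scanB_find (s : List Int) (n i : Nat) (x : Int) (offs : List Nat) :
    scanB s n i x offs =
      ((offs.find? (fun off => decide (s.getD ((i + off) % n) 0 < x))).map
        (fun off => s.getD ((i + off) % n) 0)).getD (-1) := by
  induction offs with
  | nil => rfl
  | cons off rest ih =>
    unfold scanB
    rw [List.find?_cons]
    by_cases hc : s.getD ((i + off) % n) 0 < x
    · rw [if_pos hc, decide_eq_true hc]
      rfl
    · rw [if_neg hc, decide_eq_false hc, ih]

theorem ansB_find (s : List Int) (i : Nat) (h : i < s.length) :
    ansB s i = (((List.range' (i + 1) (s.length - 1)).find? (pOk s i)).map (tval s)).getD (-1) := by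
  unfold ansB
  rw [scanB_find]
  have hmap : List.range' (i + 1) (s.length - 1) = (List.range' 1 (s.length - 1)).map (fun x => i + x) :=
    (List.map_add_range' 1 (s.length - 1) 1).symm
  have hpt : ∀ off : Nat, pOk s i (i + off) = decide (s.getD ((i + off) % s.length) 0 < s.getD i 0) := by
    intro off
    unfold pOk tval
    rw [Nat.mod_eq_of_lt h]
  have hfun : (pOk s i ∘ fun x => i + x)
      = (fun off => decide (s.getD ((i + off) % s.length) 0 < s.getD i 0)) := by
    funext off
    simp only [Function.comp]
    exact hpt off
  rw [hmap, List.find?_map, hfun]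
  cases (List.range' 1 (s.length - 1)).find? (fun off => decide (s.getD ((i + off) % s.length) 0 < s.getD i 0)) with
  | none => rfl
  | some off => rfl

-- the doubled second half adds nothing: restricting the search window to n-1 offsets is enough
theorem find_window (s : List Int) (i : Nat) (h : i < s.length) :
    (List.range' (i + 1) (2 * s.length - (i + 1))).find? (pOk s i) =
      (List.range' (i + 1) (s.length - 1)).find? (pOk s i) := by
  set n := s.length with hn
  have hsplit : List.range' (i + 1) (n - 1) ++ List.range' (i + n) (n - i) = List.range' (i + 1) (2 * n - (i + 1)) := by
    have h1 : (i + 1) + 1 * (n - 1) = i + n := by omega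
    have h2 : (n - 1) + (n - i) = 2 * n - (i + 1) := by omega
    rw [← h2, ← List.range'_append, h1]
  rw [← hsplit, List.find?_append]
  cases hf : (List.range' (i + 1) (n - 1)).find? (pOk s i) with
  | some j0 => rfl
  | none =>
    have hnone2 : (List.range' (i + n) (n - i)).find? (pOk s i) = none := by
      refine List.find?_eq_none.mpr ?_
      intro j hj
      rcases List.mem_range'_1.mp hj with ⟨hj1, hj2⟩
      have htj : tval s j = tval s (j - n) := by
        unfold tval
        rw [← hn, Nat.mod_eq_sub_mod (by omega)]
      by_cases hji : j - n = i
      · simp [pOk, htj, hji]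
      · have hjm : j - n ∈ List.range' (i + 1) (n - 1) :=
          List.mem_range'_1.mpr ⟨by omega, by omega⟩
        have := List.find?_eq_none.mp hf _ hjm
        simp only [pOk, decide_eq_true_eq] at this ⊢
        rw [htj]; exact this
    rw [hnone2]; rfl

theorem resSpec_stable (s : List Int) (i : Nat) (h : s.length ≤ i) :
    resSpec s (i + 1) = resSpec s i := by
  unfold resSpec
  refine List.map_congr_left ?_
  intro k hk
  have hk' : k < s.length := List.mem_range.mp hk
  have h1 : ¬ (i + 1 ≤ k) := by omega
  have h2 : ¬ (i ≤ k) := by omega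
  rw [if_neg h1, if_neg h2]

theorem resSpec_miss (s : List Int) (i : Nat) (h : i < s.length) (hans : ansB s i = -1) :
    resSpec s (i + 1) = resSpec s i := by
  unfold resSpec
  refine List.map_congr_left ?_
  intro k hk
  by_cases hki : k = i
  · subst hki
    rw [if_neg (by omega), if_pos (by omega), hans]
  · have : (i + 1 ≤ k) ↔ (i ≤ k) := by omega
    simp [this]

theorem resSpec_set (s : List Int) (i : Nat) (_h : i < s.length) (v : Int) (hv : v = ansB s i) :
    (resSpec s (i + 1)).set i v = resSpec s i := by
  unfold resSpec
  refine List.ext_getElem (by simp) ?_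
  intro j h1 h2
  have hj : j < s.length := by simpa using h2
  rw [List.getElem_set]
  simp only [List.getElem_map, List.getElem_range]
  by_cases hij : i = j
  · subst hij
    rw [if_pos rfl, if_pos (le_refl i), hv]
  · rw [if_neg hij]
    have hiff : (i + 1 ≤ j) ↔ (i ≤ j) := by omega
    simp only [hiff]

-- main invariant step
theorem stepA_spec (s : List Int) (i : Nat) (h : i < 2 * s.length) :
    stepA s s.length i ((Jset s (i + 1)).map (tval s), resSpec s (i + 1)) =
      ((Jset s i).map (tval s), resSpec s i) := by
  have hn : 0 < s.length := by omega
  have hpw : List.Pairwise (fun a b => b < a) ((Jset s (i + 1)).map (tval s)) :=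
    List.pairwise_map.mpr (Jset_pairwise s (i + 1))
  have hstack : dropGe (tval s i) ((Jset s (i + 1)).map (tval s))
      = ((Jset s (i + 1)).filter (pOk s i)).map (tval s) := by
    rw [dropGe_eq_filter _ _ hpw, List.filter_map]
    rfl
  have hx : s.getD (i % s.length) 0 = tval s i := rfl
  simp only [stepA, hx, hstack, Prod.mk.injEq]
  constructor
  · rw [Jset_step s i h, List.map_cons]
  · by_cases hlt : i < s.length
    · have hidx : i % s.length = i := Nat.mod_eq_of_lt hlt
      have hhead := Jset_find s i
      cases ho : (List.range' (i + 1) (2 * s.length - (i + 1))).find? (pOk s i) with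
      | none =>
        have hF : (Jset s (i + 1)).filter (pOk s i) = [] := by
          have := hhead.trans ho
          exact List.head?_eq_none_iff.mp this
        have hans : ansB s i = -1 := by
          rw [ansB_find s i hlt, ← find_window s i hlt, ho]
          rfl
        rw [hF]
        simpa using resSpec_miss s i hlt hans
      | some j0 =>
        have hF : ((Jset s (i + 1)).filter (pOk s i)).head? = some j0 := hhead.trans ho
        cases hFc : (Jset s (i + 1)).filter (pOk s i) with
        | nil => rw [hFc] at hF; exact absurd hF (by simp)
        | cons f0 F' =>
          rw [hFc] at hF
          have hf0 : f0 = j0 := by simpa using hF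
          subst hf0
          have hans : ansB s i = tval s f0 := by
            rw [ansB_find s i hlt, ← find_window s i hlt, ho]
            rfl
          simp only [List.map_cons, hidx, if_pos hlt]
          exact resSpec_set s i hlt (tval s f0) hans.symm
    · have hst : resSpec s (i + 1) = resSpec s i := resSpec_stable s i (by omega)
      cases hFc : (Jset s (i + 1)).filter (pOk s i) with
      | nil => simpa using hst
      | cons f0 F' =>
        simp only [List.map_cons, if_neg hlt]
        exact hst

theorem loopA_spec (s : List Int) (i : Nat) (h : i ≤ 2 * s.length) :
    loopA s s.length i ((Jset s i).map (tval s), resSpec s i) =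
      ((Jset s 0).map (tval s), resSpec s 0) := by
  induction i with
  | zero => rfl
  | succ i ih =>
    show loopA s s.length i (stepA s s.length i _) = _
    rw [stepA_spec s i (by omega)]
    exact ih (by omega)

theorem Jset_top (s : List Int) : Jset s (2 * s.length) = [] := by
  unfold Jset
  rw [Nat.sub_self]
  rfl

theorem resSpec_top (s : List Int) : resSpec s (2 * s.length) = List.replicate s.length (-1) := by
  unfold resSpec
  refine List.ext_getElem (by simp) ?_
  intro j h1 h2
  have hj : j < s.length := by simpa using h2
  rw [List.getElem_map, List.getElem_range, List.getElem_replicate, if_neg (by omega)]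

theorem next_small_elem_eq (s : List Int) : next_small_elem s = next_small_elem_alt s := by
  have hmain := loopA_spec s (2 * s.length) (le_refl _)
  rw [Jset_top, resSpec_top, List.map_nil] at hmain
  have h0 : next_small_elem s = (loopA s s.length (2 * s.length) ([], List.replicate s.length (-1))).2 := rfl
  rw [h0, hmain]
  show resSpec s 0 = next_small_elem_alt s
  unfold resSpec next_small_elem_alt ansB
  simp

-- ===== VERDICT (by name: the statement is the Claim_ definition above) =====
theorem next_small_elem_spec : Claim_equal_next_small_elem := by
  intro s _
  unfold Spec_next_small_elem
  exact next_small_elem_eq s
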